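-- pv_equiv track=rewrite | github.com/yentangen/C-Flow-Diagram | CSourceProc.py | _sunder_formatting
-- ===== SOURCE A (Python) =====
-- def _partition(string,char):
--     templist = string.partition(char)
--     retlist = [templist[0]]
--     retlist.append(char)
--     if (char in templist[2]):
--         tmpbuf = _partition(templist[2],char)
--         for element in tmpbuf:
--             retlist.append(element)
--     else:
--         retlist.append(templist[2])
--     return retlist
--
-- def _sunder_formatting(lcode,start,end):
--     ret_string=""
--     ret_list = []
--     for line in lcode:
--         if (line == ""):
--             continue
--         ret_string+=line.strip()
--
--     #now lets space out all ('s, )'s, {'s, }'s, nad ;'s, since the C compilers do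
--     #not do it for us. This allows us to compile a list of words.
--     ret_list = [ret_string]
--     tmp_buf = ret_list
--
--     for symbol in ['(',')','{','}',';']:
--         ret_list = []
--         for clause in tmp_buf:
--             if symbol in clause:
--                 ret_list.extend(_partition(clause,symbol))
--             else:
--                 ret_list.append(clause)
--         tmp_buf = ret_list
--
--     return ret_list
-- ===== SOURCE B (Python) =====
-- def _sunder_formatting(lcode, start, end):
--     src = "".join(line.strip() for line in lcode if line != "")
--     out = []
--     buf = ""
--     for ch in src:
--         if ch in "(){};":
--             out.append(buf)
--             out.append(ch)
--             buf = ""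
--         else:
--             buf += ch
--     out.append(buf)
--     return out
-- ===== Notes on version B (the rewrite author's own statement) =====
-- stated objective: simpler
-- what changed: Replaces the five per-delimiter rebuild passes with their recursive string-partition helper by one forward character scan that pushes the running buffer at each delimiter.
import Mathlib
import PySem

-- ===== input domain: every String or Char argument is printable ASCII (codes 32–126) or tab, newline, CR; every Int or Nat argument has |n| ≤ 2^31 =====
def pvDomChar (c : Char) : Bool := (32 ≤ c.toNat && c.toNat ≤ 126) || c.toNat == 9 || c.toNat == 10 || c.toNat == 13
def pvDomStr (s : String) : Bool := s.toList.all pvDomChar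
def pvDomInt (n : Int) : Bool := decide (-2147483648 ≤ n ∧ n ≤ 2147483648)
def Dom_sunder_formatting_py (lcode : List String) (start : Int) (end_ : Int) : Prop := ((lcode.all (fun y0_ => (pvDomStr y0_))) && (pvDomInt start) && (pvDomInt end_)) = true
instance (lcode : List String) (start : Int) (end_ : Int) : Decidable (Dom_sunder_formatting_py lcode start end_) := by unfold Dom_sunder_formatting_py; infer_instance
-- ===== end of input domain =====

-- B replaces A's five per-delimiter rebuild passes (with a recursive string partition
-- helper) by a single forward character scan; objective: simpler, same asymptotic cost.

-- ===== PORT A =====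
-- string.partition(char) over List Char: (before, sep-or-empty, after)
def pvPart3 (c : Char) : List Char → List Char × List Char × List Char
  | [] => ([], [], [])
  | a :: t =>
    if a = c then ([], [c], t)
    else
      let r := pvPart3 c t
      (a :: r.1, r.2.1, r.2.2)

theorem pvPart3_after (c : Char) : ∀ l : List Char, (pvPart3 c l).2.2 = [] ∨ (pvPart3 c l).2.2.length < l.length := by
  intro l
  induction l with
  | nil => exact Or.inl rfl
  | cons a t ih =>
    by_cases h : a = c
    · right; simp [pvPart3, h]
    · rcases ih with he | hl
      · left; simpa [pvPart3, h] using he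
      · right
        simp only [pvPart3, if_neg h, List.length_cons]
        omega

-- literal port of _partition (called only with c present; recursion on the 'after' part)
def pvPartitionA (s : List Char) (c : Char) : List (List Char) :=
  if h : c ∈ (pvPart3 c s).2.2 then
    (pvPart3 c s).1 :: [c] :: pvPartitionA (pvPart3 c s).2.2 c
  else
    [(pvPart3 c s).1, [c], (pvPart3 c s).2.2]
termination_by s.length
decreasing_by
  rcases pvPart3_after c s with he | hl
  · rw [he] at h; cases h
  · exact hl

def sunder_formatting_py (lcode : List String) (start : Int) (end_ : Int) : List String :=
  -- ret_string accumulation loop (skip "" lines, append line.strip()),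
  -- then five per-symbol passes, each rebuilding the clause list
  ((['(', ')', '{', '}', ';'] : List Char).foldl
      (fun tmp_buf symbol =>
        tmp_buf.foldl
          (fun ret_list clause =>
            if symbol ∈ clause then ret_list ++ pvPartitionA clause symbol
            else ret_list ++ [clause]) [])
      [lcode.foldl (fun acc line => if line = "" then acc else acc ++ (PySem.Str.strip line).toList) []]).map String.mk

-- ===== PORT B =====
-- single forward scan with a running buffer
def pvScan : List Char → List Char → List (List Char)
  | [], buf => [buf]
  | a :: t, buf =>
    if a ∈ (['(', ')', '{', '}', ';'] : List Char) then buf :: [a] :: pvScan t []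
    else pvScan t (buf ++ [a])

def sunder_formatting_py_alt (lcode : List String) (start : Int) (end_ : Int) : List String :=
  (pvScan ((lcode.filter (fun line => line ≠ "")).flatMap (fun line => (PySem.Str.strip line).toList)) []).map String.mk

-- ===== PRECONDITION & SPEC =====
def Spec_sunder_formatting_py (lcode : List String) (start : Int) (end_ : Int) (out : List String) : Prop := out = sunder_formatting_py_alt lcode start end_
instance (lcode : List String) (start : Int) (end_ : Int) (out : List String) : Decidable (Spec_sunder_formatting_py lcode start end_ out) := by unfold Spec_sunder_formatting_py; infer_instance

-- ===== CLAIM (what is proved, stated in full; the proofs are below) =====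
def Claim_equal_sunder_formatting_py : Prop := ∀ (lcode : List String) (start : Int) (end_ : Int), Dom_sunder_formatting_py lcode start end_ → Spec_sunder_formatting_py lcode start end_ (sunder_formatting_py lcode start end_)

-- ===== LEMMAS AND PROOFS =====

-- reference splitter: split on every char of ds, keeping delimiters as singleton tokens
def pvSpec (ds : List Char) : List Char → List (List Char)
  | [] => [[]]
  | a :: t =>
    if a ∈ ds then [] :: [a] :: pvSpec ds t
    else
      match pvSpec ds t with
      | [] => [[a]]
      | h :: r => (a :: h) :: r

theorem pvSpec_ne_nil (ds : List Char) (l : List Char) : pvSpec ds l ≠ [] := by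
  cases l with
  | nil => simp [pvSpec]
  | cons a t =>
    by_cases h : a ∈ ds
    · simp [pvSpec, h]
    · simp only [pvSpec, if_neg h]
      cases pvSpec ds t <;> simp

-- the scan with buffer prepends the buffer onto the first token
theorem pvScan_buf : ∀ (l buf : List Char),
    pvScan l buf =
      match pvSpec ['(', ')', '{', '}', ';'] l with
      | [] => []
      | h :: r => (buf ++ h) :: r := by
  intro l
  induction l with
  | nil => intro buf; simp [pvScan, pvSpec]
  | cons a t ih =>
    intro buf
    by_cases h : a ∈ (['(', ')', '{', '}', ';'] : List Char)
    · have ht := ih []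
      rcases hs : pvSpec ['(', ')', '{', '}', ';'] t with _ | ⟨hh, r⟩
      · exact absurd hs (pvSpec_ne_nil _ _)
      · simp [pvScan, pvSpec, h, ih [], hs]
    · rcases hs : pvSpec ['(', ')', '{', '}', ';'] t with _ | ⟨hh, r⟩
      · exact absurd hs (pvSpec_ne_nil _ _)
      · simp [pvScan, pvSpec, h, ih (buf ++ [a]), hs]

theorem pvSpec_no_delim (ds : List Char) : ∀ l : List Char, (∀ x ∈ l, x ∉ ds) → pvSpec ds l = [l] := by
  intro l
  induction l with
  | nil => intro _; rfl
  | cons a t ih =>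
    intro h
    have ha : a ∉ ds := h a (by simp)
    have := ih (fun x hx => h x (by simp [hx]))
    simp [pvSpec, ha, this]

theorem pvSpec_split (c : Char) : ∀ (b a : List Char), c ∉ b →
    pvSpec [c] (b ++ c :: a) = b :: [c] :: pvSpec [c] a := by
  intro b
  induction b with
  | nil => intro a _; simp [pvSpec]
  | cons x b' ih =>
    intro a h
    have hx : x ≠ c := by intro e; exact h (by simp [e])
    have hb : c ∉ b' := fun hc => h (by simp [hc])
    simp [pvSpec, hx, ih a hb]

theorem pvPart3_decomp (c : Char) : ∀ l : List Char, c ∈ l →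
    (pvPart3 c l).1 ++ c :: (pvPart3 c l).2.2 = l ∧ c ∉ (pvPart3 c l).1 := by
  intro l
  induction l with
  | nil => intro h; cases h
  | cons a t ih =>
    intro h
    by_cases ha : a = c
    · subst ha; simp [pvPart3]
    · have hct : c ∈ t := by
        rcases List.mem_cons.mp h with h1 | h1
        · exact absurd h1.symm ha
        · exact h1
      obtain ⟨h1, h2⟩ := ih hct
      refine ⟨by simp [pvPart3, ha, h1], ?_⟩
      simp only [pvPart3, if_neg ha]
      intro hcmem
      rcases List.mem_cons.mp hcmem with h3 | h3
      · exact ha h3.symm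
      · exact h2 h3

theorem pvPartitionA_spec (c : Char) : ∀ (n : ℕ) (l : List Char), l.length ≤ n → c ∈ l →
    pvPartitionA l c = pvSpec [c] l := by
  intro n
  induction n with
  | zero =>
    intro l hl hc
    have hl0 : l = [] := List.length_eq_zero_iff.mp (Nat.le_zero.mp hl)
    subst hl0; cases hc
  | succ n ih =>
    intro l hl hc
    obtain ⟨hdec, hnb⟩ := pvPart3_decomp c l hc
    by_cases h : c ∈ (pvPart3 c l).2.2
    · have hlen : (pvPart3 c l).2.2.length < l.length := by
        rcases pvPart3_after c l with he | hlt
        · rw [he] at h; cases h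
        · exact hlt
      rw [pvPartitionA, dif_pos h, ih _ (by omega) h]
      conv_rhs => rw [← hdec]
      rw [pvSpec_split c _ _ hnb]
    · have hno : pvSpec [c] (pvPart3 c l).2.2 = [(pvPart3 c l).2.2] := by
        apply pvSpec_no_delim
        intro x hx hxc
        simp only [List.mem_singleton] at hxc
        exact h (hxc ▸ hx)
      rw [pvPartitionA, dif_neg h]
      conv_rhs => rw [← hdec]
      rw [pvSpec_split c _ _ hnb, hno]

-- one pass of A's per-symbol loop is flatMap of the single-symbol splitter
theorem pvPassA (c : Char) : ∀ (buf : List (List Char)) (acc : List (List Char)),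
    buf.foldl (fun ret_list clause =>
        if c ∈ clause then ret_list ++ pvPartitionA clause c else ret_list ++ [clause]) acc
      = acc ++ buf.flatMap (pvSpec [c]) := by
  intro buf
  induction buf with
  | nil => intro acc; simp
  | cons clause rest ih =>
    intro acc
    by_cases h : c ∈ clause
    · rw [List.foldl_cons, if_pos h, ih,
        pvPartitionA_spec c clause.length clause le_rfl h]
      simp [List.flatMap_cons]
    · have hs : pvSpec [c] clause = [clause] :=
        pvSpec_no_delim _ _ (fun x hx hxc => h ((List.mem_singleton.mp hxc) ▸ hx))
      rw [List.foldl_cons, if_neg h, ih]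
      simp [List.flatMap_cons, hs]

-- composing a fresh single-symbol split after a multi-symbol split
theorem pvSpec_comp (c : Char) (ds : List Char) (hc : c ∉ ds) : ∀ l : List Char,
    (pvSpec ds l).flatMap (pvSpec [c]) = pvSpec (c :: ds) l := by
  intro l
  induction l with
  | nil => simp [pvSpec]
  | cons a t ih =>
    by_cases had : a ∈ ds
    · have hac : ¬ a = c := fun e => hc (e ▸ had)
      have h1 : pvSpec ds (a :: t) = [] :: [a] :: pvSpec ds t := by simp [pvSpec, had]
      have h2 : pvSpec (c :: ds) (a :: t) = [] :: [a] :: pvSpec (c :: ds) t := by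
        simp [pvSpec, had]
      rw [h1, List.flatMap_cons, List.flatMap_cons, h2, ← ih]
      simp [pvSpec, hac]
    · by_cases hacc : a = c
      · subst hacc
        rcases hs : pvSpec ds t with _ | ⟨h, r⟩
        · exact absurd hs (pvSpec_ne_nil _ _)
        · have h1 : pvSpec ds (a :: t) = (a :: h) :: r := by simp [pvSpec, had, hs]
          have h2 : pvSpec (a :: ds) (a :: t) = [] :: [a] :: pvSpec (a :: ds) t := by
            simp [pvSpec]
          have h3 : pvSpec [a] (a :: h) = [] :: [a] :: pvSpec [a] h := by simp [pvSpec]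
          rw [h1, List.flatMap_cons, h3, h2, ← ih, hs, List.flatMap_cons]
          simp
      · rcases hs : pvSpec ds t with _ | ⟨h, r⟩
        · exact absurd hs (pvSpec_ne_nil _ _)
        · rcases hs' : pvSpec [c] h with _ | ⟨h', r'⟩
          · exact absurd hs' (pvSpec_ne_nil _ _)
          · have h1 : pvSpec ds (a :: t) = (a :: h) :: r := by simp [pvSpec, had, hs]
            have h2 : pvSpec [c] (a :: h) = (a :: h') :: r' := by simp [pvSpec, hacc, hs']
            have h5 : pvSpec (c :: ds) t = h' :: (r' ++ r.flatMap (pvSpec [c])) := by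
              rw [← ih, hs, List.flatMap_cons, hs']; simp
            have h6 : a ∉ c :: ds := by simp [hacc, had]
            have h7 : pvSpec (c :: ds) (a :: t)
                = (a :: h') :: (r' ++ r.flatMap (pvSpec [c])) := by
              simp [pvSpec, h6, h5]
            rw [h1, List.flatMap_cons, h2, h7]
            simp

theorem pvSpec_congr (ds₁ ds₂ : List Char) (h : ∀ x, x ∈ ds₁ ↔ x ∈ ds₂) :
    ∀ l : List Char, pvSpec ds₁ l = pvSpec ds₂ l := by
  intro l
  induction l with
  | nil => rfl
  | cons a t ih =>
    by_cases ha : a ∈ ds₁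
    · simp [pvSpec, ha, (h a).mp ha, ih]
    · have ha₂ : a ∉ ds₂ := fun hx => ha ((h a).mpr hx)
      simp [pvSpec, ha, ha₂, ih]

-- A's line-joining loop equals B's filter + flatMap
theorem pvJoin_eq : ∀ (lcode : List String) (acc : List Char),
    lcode.foldl (fun acc line => if line = "" then acc else acc ++ (PySem.Str.strip line).toList) acc
      = acc ++ (lcode.filter (fun line => line ≠ "")).flatMap (fun line => (PySem.Str.strip line).toList) := by
  intro lcode
  induction lcode with
  | nil => intro acc; simp
  | cons line rest ih =>
    intro acc
    by_cases h : line = ""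
    · simp only [List.foldl_cons]
      rw [if_pos h, ih, List.filter_cons_of_neg (by simp [h])]
    · simp only [List.foldl_cons]
      rw [if_neg h, ih, List.filter_cons_of_pos (by simp [h]), List.flatMap_cons,
        List.append_assoc]

-- ===== VERDICT (by name: the statement is the Claim_ definition above) =====
theorem sunder_formatting_py_spec : Claim_equal_sunder_formatting_py := by
  intro lcode start end_ _
  unfold Spec_sunder_formatting_py sunder_formatting_py sunder_formatting_py_alt
  rw [pvJoin_eq, List.nil_append]
  set s : List Char := (lcode.filter (fun line => line ≠ "")).flatMap (fun line => (PySem.Str.strip line).toList) with hs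
  rcases hspec : pvSpec ['(', ')', '{', '}', ';'] s with _ | ⟨h, r⟩
  · exact absurd hspec (pvSpec_ne_nil _ _)
  · have hb : pvScan s [] = h :: r := by rw [pvScan_buf s [], hspec]; simp
    have ha : (['(', ')', '{', '}', ';'] : List Char).foldl
        (fun tmp_buf symbol =>
          tmp_buf.foldl
            (fun ret_list clause =>
              if symbol ∈ clause then ret_list ++ pvPartitionA clause symbol
              else ret_list ++ [clause]) [])
        [s] = pvSpec ['(', ')', '{', '}', ';'] s := by
      simp only [List.foldl_cons, List.foldl_nil, pvPassA, List.nil_append]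
      rw [show [s].flatMap (pvSpec ['(']) = pvSpec ['('] s by simp,
        pvSpec_comp ')' ['('] (by decide),
        pvSpec_comp '{' [')', '('] (by decide),
        pvSpec_comp '}' ['{', ')', '('] (by decide),
        pvSpec_comp ';' ['}', '{', ')', '('] (by decide)]
      refine pvSpec_congr _ _ (fun x => ?_) s
      simp only [List.mem_cons, List.not_mem_nil, or_false]
      tauto
    rw [ha, hspec, hb]
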